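-- pv_equiv track=rewrite | github.com/jmmichaud/BioinfoTools | DNASequencingFunctions.py | InOutDict
-- ===== SOURCE A (Python) =====
-- def InOutDict(dbdict):
--     """Inputs a DeBruijn graph as a dictionary in the format:
--     {left edge: [right edge1, right edge2...],...}.
--     Ouputs the number in degree and out degree of all nodes in a DB graph
--     as a dictionary in the format:{node1 : [#indegree, #outdegree]...}.
--     """
--     inoutdict = {}
--     for key in dbdict:
--         if key not in inoutdict: #add new dictionary entry
--             inoutdict[key] = [0, 0]
--             for item in dbdict[key]:
--                 inoutdict[key][1] += 1 #add outdegrees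
--                 if item not in inoutdict: #add new dictionary entry
--                     inoutdict[item] = [0, 0]
--                     inoutdict[item][0] = 1 #add indegree
--                 else:  #for existing entry
--                    inoutdict[item][0] += 1 #add indegree
--         else:  #for existing entry
--            for item in dbdict[key]:
--                inoutdict[key][1] += 1  #add outdegrees
--                if item not in inoutdict: #add new dictionary entry
--                    inoutdict[item] = [0, 0]
--                    inoutdict[item][0] = 1 #add indegree
--                else: #for existing entry
--                    inoutdict[item][0] += 1 #add indegree
--     return inoutdict
-- ===== SOURCE B (Python) =====
-- def InOutDict(dbdict):
--     """Same contract as A: {node: [indegree, outdegree]} for a De Bruijn graph dict.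
--     Index-then-assemble: one pass builds an indegree index, a second pass
--     assembles each node's [in, out] pair in closed form (no incremental cells)."""
--     ind = {}
--     for edges in dbdict.values():
--         for t in edges:
--             ind[t] = ind.get(t, 0) + 1
--     result = {}
--     for key, edges in dbdict.items():
--         if key not in result:
--             result[key] = [ind.get(key, 0), len(edges)]
--         for t in edges:
--             if t not in result:
--                 result[t] = [ind.get(t, 0), len(dbdict.get(t, []))]
--     return result
-- ===== Notes on version B (the rewrite author's own statement) =====
-- stated objective: alternative
-- what changed: A maintains one dict of mutable [in,out] cells incremented in an interleaved single pass; B first builds an indegree index in one counting pass and then assembles each node's [indegree, outdegree] value in closed form in a second pass, never mutating an entry after insertion. Pre_ excludes association lists with duplicate keys, which do not represent any Python dict input.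
import Mathlib
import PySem

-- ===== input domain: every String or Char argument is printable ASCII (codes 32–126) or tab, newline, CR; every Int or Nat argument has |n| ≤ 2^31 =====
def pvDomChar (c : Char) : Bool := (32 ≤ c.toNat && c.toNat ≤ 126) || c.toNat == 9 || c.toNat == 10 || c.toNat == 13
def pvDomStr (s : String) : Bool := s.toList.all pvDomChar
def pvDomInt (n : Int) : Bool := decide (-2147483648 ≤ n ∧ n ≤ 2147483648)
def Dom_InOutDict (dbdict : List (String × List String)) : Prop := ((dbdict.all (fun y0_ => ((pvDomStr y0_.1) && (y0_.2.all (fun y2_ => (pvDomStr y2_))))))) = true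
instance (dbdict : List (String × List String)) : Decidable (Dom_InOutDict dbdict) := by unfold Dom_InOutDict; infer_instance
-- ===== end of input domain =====

-- B replaces A's interleaved pass over one dict of mutable [in,out] cells by an
-- index-then-assemble decomposition: a counting pass for indegrees, then an assembly
-- pass writing each node's final [indegree, outdegree] once, in closed form.

-- ===== PORT A =====
-- v[i] += 1  (index always in range here: values are the 2-lists A creates)
def pvIncAt (v : List Int) (i : Nat) : List Int := v.set i (v.getD i 0 + 1)
-- v[i] = x
def pvSetAt (v : List Int) (i : Nat) (x : Int) : List Int := v.set i x

-- the loop 'for item in dbdict[key]: …' (identical in both branches of A)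
def pvAInner (key : String) (d : PySem.Dict String (List Int)) (items : List String) :
    PySem.Dict String (List Int) :=
  items.foldl (fun d item =>
    let d := d.modify key [0, 0] (fun v => pvIncAt v 1)        -- inoutdict[key][1] += 1
    if d.contains item then
      d.modify item [0, 0] (fun v => pvIncAt v 0)              -- inoutdict[item][0] += 1
    else
      (d.insert item [0, 0]).modify item [0, 0] (fun v => pvSetAt v 0 1)) d
      -- inoutdict[item] = [0,0]; inoutdict[item][0] = 1

def pvAStep (d : PySem.Dict String (List Int)) (p : String × List String) :
    PySem.Dict String (List Int) :=
  if d.contains p.1 then pvAInner p.1 d p.2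
  else pvAInner p.1 (d.insert p.1 [0, 0]) p.2

def InOutDict (dbdict : List (String × List String)) : List (String × List Int) :=
  (dbdict.foldl pvAStep PySem.Dict.empty).items

-- ===== PORT B =====
-- ind = {}; for edges in dbdict.values(): for t in edges: ind[t] = ind.get(t, 0) + 1
def pvInd (dbdict : List (String × List String)) : PySem.Dict String Int :=
  dbdict.foldl (fun d p => p.2.foldl (fun d t => d.insert t (d.getD t 0 + 1)) d)
    PySem.Dict.empty

-- body of B's assembly loop over dbdict.items()
def pvBStep (ind : PySem.Dict String Int) (db : PySem.Dict String (List String))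
    (r : PySem.Dict String (List Int)) (p : String × List String) :
    PySem.Dict String (List Int) :=
  let r := if r.contains p.1 then r
           else r.insert p.1 [ind.getD p.1 0, (p.2.length : Int)]
  p.2.foldl (fun r t =>
    if r.contains t then r
    else r.insert t [ind.getD t 0, (((db.getD t []).length : Int))]) r

def InOutDict_alt (dbdict : List (String × List String)) : List (String × List Int) :=
  (dbdict.foldl (pvBStep (pvInd dbdict) (PySem.Dict.mk dbdict)) PySem.Dict.empty).items

-- ===== PRECONDITION & SPEC =====
-- Pre_ excludes association lists with repeated keys: they do not represent any
-- Python dict input (a dict cannot hold duplicate keys), so A's behaviour there is undefined.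
def Pre_InOutDict (dbdict : List (String × List String)) : Prop :=
  (dbdict.map Prod.fst).Nodup
instance (dbdict : List (String × List String)) : Decidable (Pre_InOutDict dbdict) := by
  unfold Pre_InOutDict; infer_instance

def pvWitness_InOutDict : (List (String × List String)) :=
  [("AB", ["BC", "BB", "BC"]), ("BC", ["CA"])]

def Spec_InOutDict (dbdict : List (String × List String)) (out : List (String × List Int)) : Prop := out = InOutDict_alt dbdict
instance (dbdict : List (String × List String)) (out : List (String × List Int)) : Decidable (Spec_InOutDict dbdict out) := by unfold Spec_InOutDict; infer_instance

-- ===== CLAIM (what is proved, stated in full; the proofs are below) =====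
def Claim_equal_InOutDict : Prop := ∀ (dbdict : List (String × List String)), Dom_InOutDict dbdict → Pre_InOutDict dbdict → Spec_InOutDict dbdict (InOutDict dbdict)

-- ===== LEMMAS AND PROOFS =====

-- the stream of nodes in order of first possible appearance: each key, then its targets
def pvTouches (l : List (String × List String)) : List String :=
  l.flatMap (fun p => p.1 :: p.2)

-- total indegree / outdegree contributed by l
def pvTin (l : List (String × List String)) (k : String) : Int :=
  ((l.flatMap (fun p => p.2)).count k : Int)
def pvTout (l : List (String × List String)) (k : String) : Int :=
  (((l.filter (fun p => p.1 == k)).map (fun p => (p.2.length : Int))).sum)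

-- every stored value is a 2-list
def pvShape (d : PySem.Dict String (List Int)) : Prop :=
  ∀ k, ∃ a b : Int, d.getD k [0, 0] = [a, b]

theorem pvShape_empty : pvShape PySem.Dict.empty := by
  intro k; exact ⟨0, 0, by simp⟩

theorem pvAInner_spec (key : String) :
    ∀ (items : List String) (d : PySem.Dict String (List Int)), pvShape d →
      d.contains key = true →
      (pvAInner key d items).keys = PySem.Set.update d.keys items ∧
      pvShape (pvAInner key d items) ∧
      ∀ k, (pvAInner key d items).getD k [0, 0] =
        [(d.getD k [0, 0]).getD 0 0 + (items.count k : Int),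
         (d.getD k [0, 0]).getD 1 0 + (if k = key then (items.length : Int) else 0)] := by
  intro items
  induction items with
  | nil =>
    intro d hs _
    refine ⟨by simp [pvAInner, PySem.Set.update_nil], hs, ?_⟩
    intro k
    obtain ⟨a, b, hab⟩ := hs k
    simp [pvAInner, hab]
  | cons item items ih =>
    intro d hs hkey
    obtain ⟨ka, kb, hk⟩ := hs key
    have hkeys1 : (d.modify key [0,0] (fun v => pvIncAt v 1)).keys = d.keys := by
      rw [PySem.Dict.keys_modify]
      exact PySem.Dict.keys_insert_of_contains _ _ hkey
    have hcont1 : ∀ k, (d.modify key [0,0] (fun v => pvIncAt v 1)).contains k = d.contains k := by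
      intro k
      rw [PySem.Dict.contains_eq_decide_mem_keys, PySem.Dict.contains_eq_decide_mem_keys, hkeys1]
    have hget1 : ∀ k, (d.modify key [0,0] (fun v => pvIncAt v 1)).getD k [0,0] =
        if k = key then [ka, kb + 1] else d.getD k [0,0] := by
      intro k
      rw [PySem.Dict.getD_modify]
      split_ifs
      · rw [hk]; rfl
      · rfl
    have hs1 : pvShape (d.modify key [0,0] (fun v => pvIncAt v 1)) := by
      intro k
      rw [hget1]
      split_ifs
      · exact ⟨ka, kb + 1, rfl⟩
      · exact hs k
    -- the one-item step of the loop body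
    have hstep : pvAInner key d (item :: items) = pvAInner key
        (if (d.modify key [0,0] (fun v => pvIncAt v 1)).contains item then
           (d.modify key [0,0] (fun v => pvIncAt v 1)).modify item [0,0] (fun v => pvIncAt v 0)
         else ((d.modify key [0,0] (fun v => pvIncAt v 1)).insert item [0,0]).modify item [0,0]
                (fun v => pvSetAt v 0 1)) items := rfl
    set d1 := d.modify key [0,0] (fun v => pvIncAt v 1) with hd1
    set d2 := if d1.contains item then d1.modify item [0,0] (fun v => pvIncAt v 0)
              else (d1.insert item [0,0]).modify item [0,0] (fun v => pvSetAt v 0 1) with hd2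
    have hkeys2 : d2.keys = PySem.Set.add d.keys item := by
      rw [hd2]
      by_cases hc : d1.contains item = true
      · have hdc : d.contains item = true := by rw [← hcont1]; exact hc
        rw [if_pos hc, PySem.Dict.keys_modify, PySem.Dict.keys_insert_of_contains _ _ hc, hkeys1,
          PySem.Set.add_of_mem ((PySem.Dict.contains_iff_mem_keys d item).mp hdc)]
      · have hc' : d1.contains item = false := by simpa using hc
        rw [if_neg hc, PySem.Dict.keys_modify, PySem.Dict.keys_insert_of_contains, 
          PySem.Dict.keys_insert_of_not_contains _ _ hc', hkeys1, PySem.Set.add_of_not_mem]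
        · intro hmem
          rw [← hkeys1] at hmem
          exact (by simpa [hc'] using (PySem.Dict.contains_iff_mem_keys d1 item).mpr hmem)
        · exact PySem.Dict.contains_insert_self _ _ _
    have hget2 : ∀ k, d2.getD k [0,0] =
        if k = item then pvIncAt (d1.getD item [0,0]) 0 else d1.getD k [0,0] := by
      intro k
      rw [hd2]
      by_cases hc : d1.contains item = true
      · rw [if_pos hc, PySem.Dict.getD_modify]
      · have hc' : d1.contains item = false := by simpa using hc
        rw [if_neg hc, PySem.Dict.getD_modify]
        split_ifs with hki
        · subst hki
          rw [PySem.Dict.getD_insert_self, PySem.Dict.getD_of_not_contains _ _ hc']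
          rfl
        · rw [PySem.Dict.getD_insert_of_ne _ _ _ hki]
    have hs2 : pvShape d2 := by
      intro k
      rw [hget2]
      split_ifs
      · obtain ⟨a, b, hab⟩ := hs1 item
        exact ⟨a + 1, b, by rw [hab]; rfl⟩
      · exact hs1 k
    have hkey2 : d2.contains key = true := by
      rw [PySem.Dict.contains_eq_decide_mem_keys, hkeys2, decide_eq_true_iff]
      have : key ∈ d.keys := (PySem.Dict.contains_iff_mem_keys _ _).mp hkey
      rw [PySem.Set.add_eq_ite]
      split_ifs <;> simp [this]
    obtain ⟨ihk, ihs, ihg⟩ := ih d2 hs2 hkey2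
    refine ⟨?_, ?_, ?_⟩
    · rw [hstep, ihk, hkeys2, PySem.Set.update_cons]
    · rw [hstep]; exact ihs
    · intro k
      rw [hstep, ihg k, hget2 k, hget1 k]
      obtain ⟨a, b, hab⟩ := hs k
      by_cases hki : k = item <;> by_cases hkk : k = key
      · -- k = item = key
        subst hki; subst hkk
        rw [if_pos rfl, if_pos rfl, hget1, if_pos rfl]
        simp [pvIncAt, hk]
        constructor <;> ring
      · subst hki
        rw [if_pos rfl, if_neg hkk, hget1, if_neg hkk, hab]
        simp [pvIncAt, hkk]
        ring
      · subst hkk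
        rw [if_neg hki, if_pos rfl]
        have : (item == k) = false := by
          simp only [beq_eq_false_iff_ne]
          exact fun h => hki h.symm
        simp [List.count_cons, this, hk]
        ring
      · rw [if_neg hki, if_neg hkk, hab]
        have : (item == k) = false := by
          simp only [beq_eq_false_iff_ne]
          exact fun h => hki h.symm
        simp [List.count_cons, this, hkk]

theorem pvTin_cons (p : String × List String) (l : List (String × List String)) (k : String) :
    pvTin (p :: l) k = (p.2.count k : Int) + pvTin l k := by
  simp only [pvTin, List.flatMap_cons, List.count_append]
  push_cast
  ring

theorem pvTout_cons (p : String × List String) (l : List (String × List String)) (k : String) :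
    pvTout (p :: l) k = (if k = p.1 then (p.2.length : Int) else 0) + pvTout l k := by
  simp only [pvTout, List.filter_cons]
  by_cases h : p.1 = k
  · have hb : (p.1 == k) = true := by simpa using h
    simp [h.symm]
  · have hb : (p.1 == k) = false := by simpa using h
    have h' : ¬ k = p.1 := fun hh => h hh.symm
    simp [hb, h']

theorem pvAFold_spec :
    ∀ (l : List (String × List String)) (d : PySem.Dict String (List Int)), pvShape d →
      (l.foldl pvAStep d).keys = PySem.Set.update d.keys (pvTouches l) ∧
      pvShape (l.foldl pvAStep d) ∧
      ∀ k, (l.foldl pvAStep d).getD k [0, 0] =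
        [(d.getD k [0, 0]).getD 0 0 + pvTin l k,
         (d.getD k [0, 0]).getD 1 0 + pvTout l k] := by
  intro l
  induction l with
  | nil =>
    intro d hs
    refine ⟨by simp [pvTouches, PySem.Set.update_nil], hs, ?_⟩
    intro k
    obtain ⟨a, b, hab⟩ := hs k
    simp [pvTin, pvTout, hab]
  | cons p l ih =>
    intro d hs
    have hstep : pvAStep d p = pvAInner p.1 (if d.contains p.1 then d
        else d.insert p.1 [0, 0]) p.2 := by
      rw [pvAStep]
      split_ifs <;> rfl
    set d1 := if d.contains p.1 then d else d.insert p.1 [0, 0] with hd1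
    have hkeys1 : d1.keys = PySem.Set.add d.keys p.1 := by
      rw [hd1]
      by_cases hc : d.contains p.1 = true
      · rw [if_pos hc, PySem.Set.add_of_mem ((PySem.Dict.contains_iff_mem_keys _ _).mp hc)]
      · have hc' : d.contains p.1 = false := by simpa using hc
        rw [if_neg hc, PySem.Dict.keys_insert_of_not_contains _ _ hc',
          PySem.Set.add_of_not_mem (fun hm => by
            simp [(PySem.Dict.contains_iff_mem_keys d p.1).mpr hm] at hc')]
    have hget1 : ∀ k, d1.getD k [0, 0] = d.getD k [0, 0] := by
      intro k
      rw [hd1]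
      by_cases hc : d.contains p.1 = true
      · rw [if_pos hc]
      · have hc' : d.contains p.1 = false := by simpa using hc
        rw [if_neg hc, PySem.Dict.getD_insert]
        split_ifs with hk
        · subst hk; rw [PySem.Dict.getD_of_not_contains _ _ hc']
        · rfl
    have hs1 : pvShape d1 := fun k => by rw [hget1]; exact hs k
    have hkey1 : d1.contains p.1 = true := by
      rw [PySem.Dict.contains_eq_decide_mem_keys, hkeys1, decide_eq_true_iff, PySem.Set.add_eq_ite]
      split_ifs with h
      · exact h
      · exact List.mem_append_right _ (List.mem_singleton_self _)
    obtain ⟨innk, inns, inng⟩ := pvAInner_spec p.1 p.2 d1 hs1 hkey1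
    obtain ⟨ihk, ihs, ihg⟩ := ih (pvAInner p.1 d1 p.2) inns
    refine ⟨?_, ?_, ?_⟩
    · rw [List.foldl_cons, hstep, ihk, innk, hkeys1]
      have ht : pvTouches (p :: l) = (p.1 :: p.2) ++ pvTouches l := by simp [pvTouches]
      rw [ht, PySem.Set.update_append, PySem.Set.update_cons]
    · rw [List.foldl_cons, hstep]; exact ihs
    · intro k
      rw [List.foldl_cons, hstep, ihg k, inng k, hget1 k, pvTin_cons, pvTout_cons]
      obtain ⟨a, b, hab⟩ := hs k
      rw [hab]
      simp only [List.getD_cons_zero, List.getD_cons_succ]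
      by_cases hk : k = p.1
      · simp only [hk]
        push_cast
        refine List.cons_eq_cons.mpr ⟨by ring, ?_⟩
        refine List.cons_eq_cons.mpr ⟨by ring, rfl⟩
      · simp only [hk]
        push_cast
        refine List.cons_eq_cons.mpr ⟨by ring, ?_⟩
        refine List.cons_eq_cons.mpr ⟨by ring, rfl⟩

-- guarded first-touch insert loop
def pvGAdd (vf : String → List Int) (r : PySem.Dict String (List Int)) (t : String) :
    PySem.Dict String (List Int) :=
  if r.contains t then r else r.insert t (vf t)

theorem pvGAdd_fold_spec (vf : String → List Int) :
    ∀ (xs : List String) (r : PySem.Dict String (List Int)),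
      (xs.foldl (pvGAdd vf) r).keys = PySem.Set.update r.keys xs ∧
      ∀ k, (xs.foldl (pvGAdd vf) r).getD k [0, 0] =
        if r.contains k then r.getD k [0, 0]
        else if k ∈ xs then vf k else r.getD k [0, 0] := by
  intro xs
  induction xs with
  | nil => intro r; constructor
           · simp [PySem.Set.update]
           · intro k; split_ifs <;> simp_all
  | cons x xs ih =>
    intro r
    have hkeys1 : (pvGAdd vf r x).keys = PySem.Set.add r.keys x := by
      by_cases hc : r.contains x = true
      · rw [PySem.Set.add_of_mem ((PySem.Dict.contains_iff_mem_keys _ _).mp hc)]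
        simp [pvGAdd, hc]
      · have hm : x ∉ r.keys := fun hmem => hc ((PySem.Dict.contains_iff_mem_keys _ _).mpr hmem)
        rw [PySem.Set.add_of_not_mem hm]
        simp only [pvGAdd, hc, if_false, Bool.false_eq_true]
        exact PySem.Dict.keys_insert_of_not_contains _ _ (by simpa using hc)
    have hget1 : ∀ k, (pvGAdd vf r x).getD k [0,0] =
        if r.contains k then r.getD k [0,0] else if k = x then vf x else r.getD k [0,0] := by
      intro k
      by_cases hc : r.contains x = true
      · simp only [pvGAdd, hc, if_true]
        split_ifs with h1 h2
        · rfl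
        · subst h2; exact absurd hc h1
        · rfl
      · simp only [pvGAdd, hc, Bool.false_eq_true, if_false]
        by_cases hk : k = x
        · subst hk
          have : r.contains k = false := by simpa using hc
          simp [PySem.Dict.getD_insert_self, this]
        · simp [PySem.Dict.getD_insert_of_ne _ _ _ hk, hk]
    have hcont1 : ∀ k, (pvGAdd vf r x).contains k = (r.contains k || k == x) := by
      intro k
      by_cases hc : r.contains x = true
      · simp only [pvGAdd, hc, if_true]
        by_cases hk : k = x
        · subst hk; simp [hc]
        · simp [hk]
      · simp only [pvGAdd, hc, Bool.false_eq_true, if_false]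
        rw [PySem.Dict.contains_insert]
        cases h : r.contains k <;> simp [Bool.or_comm]
    obtain ⟨ihk, ihg⟩ := ih (pvGAdd vf r x)
    constructor
    · rw [List.foldl_cons, ihk, hkeys1, PySem.Set.update_cons]
    · intro k
      rw [List.foldl_cons, ihg k, hcont1 k, hget1 k]
      by_cases hrc : r.contains k = true <;> by_cases hkx : k = x <;>
        simp [hrc, hkx, List.mem_cons]


theorem pvBFold_eq_gadd (ind : PySem.Dict String Int) (db : PySem.Dict String (List String)) :
    ∀ (l : List (String × List String)) (r : PySem.Dict String (List Int)),
      (∀ p ∈ l, db.getD p.1 [] = p.2) →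
      l.foldl (pvBStep ind db) r =
        (pvTouches l).foldl (pvGAdd (fun t => [ind.getD t 0, ((db.getD t []).length : Int)])) r := by
  intro l
  induction l with
  | nil => intro r _; rfl
  | cons p l ih =>
    intro r hdb
    have hstep : pvBStep ind db r p =
        (p.1 :: p.2).foldl (pvGAdd (fun t => [ind.getD t 0, ((db.getD t []).length : Int)])) r := by
      have hp : db.getD p.1 [] = p.2 := hdb p (List.mem_cons_self ..)
      simp only [pvBStep, List.foldl_cons, pvGAdd, hp]
      rfl
    have htouch : pvTouches (p :: l) = (p.1 :: p.2) ++ pvTouches l := by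
      simp [pvTouches]
    rw [List.foldl_cons, htouch, List.foldl_append, ← hstep,
       ih _ (fun q hq => hdb q (List.mem_cons_of_mem _ hq))]

theorem pvInd_fold (k : String) :
    ∀ (l : List (String × List String)) (d : PySem.Dict String Int),
      (l.foldl (fun d p => p.2.foldl (fun d t => d.insert t (d.getD t 0 + 1)) d) d).getD k 0 =
        d.getD k 0 + pvTin l k := by
  intro l
  induction l with
  | nil => intro d; simp [pvTin]
  | cons p l ih =>
    intro d
    rw [List.foldl_cons, ih, PySem.Dict.getD_foldl_insert_add_one]
    simp only [pvTin, List.flatMap_cons, List.count_append]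
    push_cast
    ring

theorem pvInd_getD (dbdict : List (String × List String)) (k : String) :
    (pvInd dbdict).getD k 0 = pvTin dbdict k := by
  rw [pvInd, pvInd_fold]
  simp

theorem pvTout_of_not_mem (l : List (String × List String)) (k : String)
    (h : k ∉ l.map Prod.fst) : pvTout l k = 0 := by
  have : l.filter (fun p => p.1 == k) = [] := by
    rw [List.filter_eq_nil_iff]
    intro p hp hk
    exact h (List.mem_map.mpr ⟨p, hp, by simpa using hk⟩)
  simp [pvTout, this]

theorem pvTout_eq (l : List (String × List String)) (h : (l.map Prod.fst).Nodup) (k : String) :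
    pvTout l k = (((PySem.Dict.mk l).getD k []).length : Int) := by
  induction l with
  | nil => simp [pvTout, PySem.Dict.getD, PySem.Dict.get?]
  | cons p l ih =>
    obtain ⟨a, es⟩ := p
    rw [List.map_cons, List.nodup_cons] at h
    have hg : (PySem.Dict.mk ((a, es) :: l)).getD k [] =
        if (a == k) = true then es else (PySem.Dict.mk l).getD k [] := by
      simp only [PySem.Dict.getD, PySem.Dict.get?_mk_cons]
      split_ifs <;> rfl
    by_cases hk : a = k
    · subst hk
      have h0 : pvTout l a = 0 := pvTout_of_not_mem l a h.1
      simp only [pvTout, List.filter_cons] at h0 ⊢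
      simp only [hg, beq_self_eq_true, if_true, List.map_cons, List.sum_cons, h0]
      simp
    · have hb : (a == k) = false := by simpa using hk
      simp only [pvTout, List.filter_cons, hb, Bool.false_eq_true, if_false, hg]
      exact ih h.2

-- ===== VERDICT (by name: the statement is the Claim_ definition above) =====
theorem InOutDict_spec : Claim_equal_InOutDict := by
  intro dbdict _ hpre
  unfold Spec_InOutDict InOutDict InOutDict_alt
  have hpre' : (dbdict.map Prod.fst).Nodup := hpre
  obtain ⟨hAk, _, hAg⟩ := pvAFold_spec dbdict PySem.Dict.empty pvShape_empty
  have hnodup : (PySem.Dict.mk dbdict).keys.Nodup := by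
    rw [PySem.Dict.keys_mk]
    exact hpre'
  have hdb : ∀ p ∈ dbdict, (PySem.Dict.mk dbdict).getD p.1 [] = p.2 := by
    intro p hp
    have hm : (p.1, p.2) ∈ (PySem.Dict.mk dbdict).items := by simpa using hp
    exact PySem.Dict.getD_of_mem_items _ hm hnodup []
  rw [pvBFold_eq_gadd (pvInd dbdict) (PySem.Dict.mk dbdict) dbdict PySem.Dict.empty hdb]
  obtain ⟨hBk, hBg⟩ := pvGAdd_fold_spec
      (fun t => [(pvInd dbdict).getD t 0, (((PySem.Dict.mk dbdict).getD t []).length : Int)])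
      (pvTouches dbdict) PySem.Dict.empty
  rw [PySem.Dict.keys_empty, PySem.Set.update_nil_left] at hAk hBk
  have hAn : (dbdict.foldl pvAStep PySem.Dict.empty).keys.Nodup := by
    rw [hAk]; exact PySem.Set.nodup_ofList _
  have hBn : ((pvTouches dbdict).foldl
      (pvGAdd (fun t => [(pvInd dbdict).getD t 0,
        (((PySem.Dict.mk dbdict).getD t []).length : Int)])) PySem.Dict.empty).keys.Nodup := by
    rw [hBk]; exact PySem.Set.nodup_ofList _
  rw [PySem.Dict.items_eq_map_keys _ hAn [0, 0], PySem.Dict.items_eq_map_keys _ hBn [0, 0],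
    hAk, hBk]
  refine List.map_congr_left ?_
  intro k hk
  have hmem : k ∈ pvTouches dbdict := (PySem.Set.mem_ofList _ _).mp hk
  rw [hAg k, hBg k]
  simp only [PySem.Dict.getD_empty, PySem.Dict.contains_empty, Bool.false_eq_true, if_false,
    if_pos hmem]
  rw [pvInd_getD, ← pvTout_eq dbdict hpre' k]
  simp
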